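-- pv_equiv track=rewrite | github.com/Gapryong-Kim/Cryptiq1 | CryptiQ/cipher_tools/amsco.py | amsco_decode
-- ===== SOURCE A (Python) =====
-- def normalize(s):
--     return ''.join(ch.upper() for ch in s if ch.isalpha())
--
-- def cell_size(r, c, convention):
--     a, b = convention
--     return a if (r + c) % 2 == 0 else b
--
-- def amsco_decode(ciphertext, key, convention=(1, 2)):
--     ct = normalize(ciphertext)
--     c_count = len(key)
--     n = len(ct)
--
--     if not c_count or not n:
--         return ''
--
--     sizes = []
--     total = 0
--     r = 0
--
--     while total < n:
--         row = [0] * c_count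
--         for c in range(c_count):
--             if total >= n:
--                 break
--             size = cell_size(r, c, convention)
--             if total + size > n:
--                 size = n - total
--             row[c] = size
--             total += size
--         sizes.append(row)
--         r += 1
--
--     row_count = len(sizes)
--     col_len = [sum(sizes[rr][cc] for rr in range(row_count)) for cc in range(c_count)]
--
--     read_order = sorted(range(c_count), key=lambda i: key[i])
--     cols = [''] * c_count
--     pos = 0
--
--     for idx in read_order:
--         cols[idx] = ct[pos:pos + col_len[idx]]
--         pos += col_len[idx]
--
--     col_pos = [0] * c_count
--     out = []
--
--     for rr in range(row_count):
--         for cc in range(c_count):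
--             size = sizes[rr][cc]
--             if size:
--                 out.append(cols[cc][col_pos[cc]:col_pos[cc] + size])
--                 col_pos[cc] += size
--
--     return ''.join(out)
-- ===== SOURCE B (Python) =====
-- def normalize(s):
--     return ''.join(ch.upper() for ch in s if ch.isalpha())
--
-- def amsco_decode(ciphertext, key, convention=(1, 2)):
--     a, b = convention
--     ct = normalize(ciphertext)
--     n = len(ct)
--     c = len(key)
--     if c == 0 or n == 0:
--         return ''
--
--     # flat row-major list of cell sizes (cell k sits in row k//c, column k%c),
--     # the last cell truncated so the sizes sum to n exactly
--     cells = []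
--     total = 0
--     k = 0
--     while total < n:
--         size = a if (k // c + k % c) % 2 == 0 else b
--         size = min(size, n - total)
--         cells.append(size)
--         total += size
--         k += 1
--
--     # bucket the cells by column, tagging each with its plaintext offset
--     bycol = [[] for _ in range(c)]
--     p = 0
--     for k, size in enumerate(cells):
--         bycol[k % c].append((p, size))
--         p += size
--
--     # consume the ciphertext sequentially, column by column in key order,
--     # tagging every piece with the plaintext offset where it belongs
--     pieces = []
--     pos = 0
--     for cc in sorted(range(c), key=lambda i: key[i]):
--         for (q, size) in bycol[cc]:
--             pieces.append((q, ct[pos:pos + size]))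
--             pos += size
--
--     # reassemble by sorting the tagged pieces back into plaintext order
--     pieces.sort(key=lambda t: t[0])
--     return ''.join(piece for _, piece in pieces)
-- ===== Notes on version B (the rewrite author's own statement) =====
-- stated objective: alternative
-- what changed: B inverts the reassembly direction: instead of A's column-length sums, slicing the ciphertext into per-column strings and a row-major gather, B buckets the cells per column tagged with their plaintext offsets, consumes the ciphertext sequentially column-by-column in key order producing offset-tagged pieces, and recovers the plaintext by sorting the pieces by offset.
-- outside the precondition, e.g. on amsco_decode('AB', [1, 2], (0, 2)): A returns 'AB', B returns 'AB'; on amsco_decode(',ab,ab', [138, -1], (-1, 2)): A returns 'ABBBAB', B returns 'ABBAABB'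
import Mathlib
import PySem

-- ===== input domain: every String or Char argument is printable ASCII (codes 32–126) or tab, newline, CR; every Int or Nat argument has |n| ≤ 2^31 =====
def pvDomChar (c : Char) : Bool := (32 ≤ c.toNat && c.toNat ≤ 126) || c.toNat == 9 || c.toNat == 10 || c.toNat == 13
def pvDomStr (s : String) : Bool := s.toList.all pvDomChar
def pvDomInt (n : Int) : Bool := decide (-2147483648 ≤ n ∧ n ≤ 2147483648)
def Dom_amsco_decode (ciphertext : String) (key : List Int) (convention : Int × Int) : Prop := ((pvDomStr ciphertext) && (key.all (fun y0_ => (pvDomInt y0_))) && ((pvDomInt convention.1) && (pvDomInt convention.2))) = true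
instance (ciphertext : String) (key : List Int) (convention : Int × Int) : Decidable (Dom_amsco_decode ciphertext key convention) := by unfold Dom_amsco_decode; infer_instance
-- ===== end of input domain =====

-- B inverts A's reassembly: it buckets the cells per column tagged with their plaintext
-- offsets, consumes the ciphertext column-by-column in key order into offset-tagged pieces,
-- and sorts the pieces by offset — no column strings, no column-length table
-- (objective: alternative, same cost).

-- ===== PORT A =====
-- normalize: ''.join(ch.upper() for ch in s if ch.isalpha())  (shared by both sources verbatim)
def pvNormalize (s : List Char) : List Char :=
  (s.filter (fun ch => PySem.Chars.isalpha ch)).map (fun ch => PySem.Chars.upperChar ch)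

-- cell_size(r, c, convention); r, c are the (nonnegative) loop counters, so Nat % is Python's %
def pvCellSize (r c : Nat) (conv : Int × Int) : Int :=
  if (r + c) % 2 = 0 then conv.1 else conv.2

-- inner 'for c in range(c_count)' with break: returns (row, total); the Python pre-fills
-- row with zeros and assigns row[c], which is the same row this builds (zeros pad the break)
def pvRowA (cnt : Nat) (n : Int) (conv : Int × Int) (r : Nat) (j : Nat) (total : Int) :
    List Int × Int :=
  if _h : j < cnt then
    if n ≤ total then (List.replicate (cnt - j) 0, total)
    else
      let size := pvCellSize r j conv
      let size := if n < total + size then n - total else size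
      let res := pvRowA cnt n conv r (j + 1) (total + size)
      (size :: res.1, res.2)
  else ([], total)
termination_by cnt - j

-- outer 'while total < n' (fuel n: each pass strictly increases total under Pre_)
def pvGridA (cnt : Nat) (n : Int) (conv : Int × Int) : Nat → Nat → Int → List (List Int)
  | 0, _, _ => []
  | fuel + 1, r, total =>
    if total < n then
      let res := pvRowA cnt n conv r 0 total
      res.1 :: pvGridA cnt n conv fuel (r + 1) res.2
    else []

def amsco_decode (ciphertext : String) (key : List Int) (convention : Int × Int) : String :=
  let ct := pvNormalize ciphertext.toList
  let ccount := key.length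
  let n := ct.length
  if ccount = 0 ∨ n = 0 then "" else
  let sizes := pvGridA ccount (n : Int) convention n 0 0
  let rowCount := sizes.length
  -- indices rr, cc are always in range, so getD's default is never used
  let colLen : List Int :=
    (List.range ccount).map (fun cc =>
      ((List.range rowCount).map (fun rr => (sizes.getD rr []).getD cc 0)).sum)
  let readOrder := PySem.List.sorted (List.range ccount) (fun i => key.getD i 0) false
  let st := readOrder.foldl
    (fun (st : List (List Char) × Int) idx =>
      (st.1.set idx (PySem.List.slice ct (some st.2) (some (st.2 + colLen.getD idx 0))),
       st.2 + colLen.getD idx 0))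
    (List.replicate ccount ([] : List Char), (0 : Int))
  let cols := st.1
  let fin := sizes.foldl
    (fun (st : List Int × List (List Char)) row =>
      (List.range ccount).foldl
        (fun (st : List Int × List (List Char)) cc =>
          let size := row.getD cc 0
          if size ≠ 0 then
            let p := st.1.getD cc 0
            (st.1.set cc (p + size),
             st.2 ++ [PySem.List.slice (cols.getD cc []) (some p) (some (p + size))])
          else st)
        st)
    (List.replicate ccount (0 : Int), ([] : List (List Char)))
  String.ofList fin.2.flatten  -- ''.join(out)

-- ===== PORT B =====
-- flat cell list: 'while total < n' appending one cell per pass (fuel n, cf. pvGridA);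
-- k // c and k % c on the nonnegative counter k are Nat / and %
def pvCellsB (a b : Int) (c : Nat) (n : Int) : Nat → Nat → Int → List Int
  | 0, _, _ => []
  | fuel + 1, k, total =>
    if total < n then
      let size := if (k / c + k % c) % 2 = 0 then a else b
      let size := min size (n - total)
      size :: pvCellsB a b c n fuel (k + 1) (total + size)
    else []

def amsco_decode_alt (ciphertext : String) (key : List Int) (convention : Int × Int) : String :=
  let a := convention.1
  let b := convention.2
  let ct := pvNormalize ciphertext.toList
  let n := ct.length
  let c := key.length
  if c = 0 ∨ n = 0 then "" else
  let cells := pvCellsB a b c (n : Int) n 0 0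
  -- bucket the cells by column, tagging each with its plaintext offset
  let bk := (PySem.List.enumerate cells 0).foldl
    (fun (st : List (List (Int × Int)) × Int) pr =>
      (PySem.List.pySetD st.1 (PySem.Int.mod pr.1 (c : Int))
         (PySem.List.pyGetD st.1 (PySem.Int.mod pr.1 (c : Int)) [] ++ [(st.2, pr.2)]),
       st.2 + pr.2))
    (List.replicate c ([] : List (Int × Int)), (0 : Int))
  let bycol := bk.1
  -- consume the ciphertext sequentially, column by column in key order,
  -- tagging every piece with the plaintext offset where it belongs
  let fin := (PySem.List.sorted (List.range c) (fun i => key.getD i 0) false).foldl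
    (fun (st : List (Int × List Char) × Int) cc =>
      (bycol.getD cc []).foldl
        (fun (st : List (Int × List Char) × Int) qs =>
          (st.1 ++ [(qs.1, PySem.List.slice ct (some st.2) (some (st.2 + qs.2)))],
           st.2 + qs.2))
        st)
    (([] : List (Int × List Char)), (0 : Int))
  -- reassemble by sorting the tagged pieces back into plaintext order
  let pieces := PySem.List.sorted fin.1 (fun t => t.1) false
  String.ofList (pieces.map (fun t => t.2)).flatten  -- ''.join(...)

-- ===== PRECONDITION & SPEC =====
-- Pre_ keeps the conventions with positive cell sizes (the cipher's natural domain) plus the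
-- trivial inputs (empty key, or no alphabetic character, where both return '' whatever the
-- convention): with a non-positive size A's outer while-loop can fail to make progress and run
-- forever (e.g. convention (0,0) on any non-empty normalized text); on the non-positive
-- conventions where A does still return, negative sizes make A's per-column slicing and B's
-- sequential consumption slice differently; the fuelled ports above are only claimed on Pre_.
def Pre_amsco_decode (ciphertext : String) (key : List Int) (convention : Int × Int) : Prop :=
  (1 ≤ convention.1 ∧ 1 ≤ convention.2) ∨ key = []
    ∨ ciphertext.toList.filter (fun ch => PySem.Chars.isalpha ch) = []
instance (ciphertext : String) (key : List Int) (convention : Int × Int) : Decidable (Pre_amsco_decode ciphertext key convention) := by unfold Pre_amsco_decode; infer_instance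

def pvWitness_amsco_decode : String × List Int × (Int × Int) := ("NDNOTEOWHEES", [3, 1, 2], (1, 2))

def Spec_amsco_decode (ciphertext : String) (key : List Int) (convention : Int × Int) (out : String) : Prop := out = amsco_decode_alt ciphertext key convention
instance (ciphertext : String) (key : List Int) (convention : Int × Int) (out : String) : Decidable (Spec_amsco_decode ciphertext key convention out) := by unfold Spec_amsco_decode; infer_instance

-- ===== CLAIM (what is proved, stated in full; the proofs are below) =====
def Claim_equal_amsco_decode : Prop := ∀ (ciphertext : String) (key : List Int) (convention : Int × Int), Dom_amsco_decode ciphertext key convention → Pre_amsco_decode ciphertext key convention → Spec_amsco_decode ciphertext key convention (amsco_decode ciphertext key convention)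

-- ===== LEMMAS AND PROOFS =====

lemma pv_getD_set_self {α : Type} (l : List α) (m : Nat) (v d : α) (h : m < l.length) :
    (l.set m v).getD m d = v := by
  simp [List.getD_eq_getElem?_getD, h]
lemma pv_getD_set_ne {α : Type} (l : List α) (m k : Nat) (v d : α) (h : k ≠ m) :
    (l.set m v).getD k d = l.getD k d := by
  simp [List.getD_eq_getElem?_getD, List.getElem?_set_ne (by omega : m ≠ k)]
lemma pv_getD_replicate (c i : Nat) : (List.replicate c (0:Int)).getD i 0 = 0 := by
  rcases lt_or_ge i c with h|h
  · simp [List.getD_eq_getElem?_getD, h]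
  · simp [List.getD_eq_getElem?_getD, List.getElem?_eq_none_iff.2 (by simpa using h : (List.replicate c (0:Int)).length ≤ i)]

lemma pvCellsB_stop (a b : Int) (c : Nat) (n : Int) (fuel k : Nat) (total : Int)
    (h : n ≤ total) : pvCellsB a b c n fuel k total = [] := by
  cases fuel <;> simp [pvCellsB, (show ¬ total < n by omega)]

lemma pvSizeLB (a b : Int) (c : Nat) (n : Int) (ha : 1 ≤ a) (hb : 1 ≤ b) (k : Nat) (total : Int)
    (h : total < n) : 1 ≤ min (if (k / c + k % c) % 2 = 0 then a else b) (n - total) := by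
  simp only [le_min_iff]; refine ⟨by split <;> omega, by omega⟩

lemma pvCellsB_pos (a b : Int) (c : Nat) (n : Int) (ha : 1 ≤ a) (hb : 1 ≤ b) :
    ∀ (fuel k : Nat) (total : Int), ∀ s ∈ pvCellsB a b c n fuel k total, 1 ≤ s := by
  intro fuel
  induction fuel with
  | zero => intro k total s hs; simp [pvCellsB] at hs
  | succ m ih =>
    intro k total s hs
    by_cases h : total < n
    · simp only [pvCellsB, if_pos h] at hs
      rcases List.mem_cons.1 hs with h1 | h1
      · subst h1; exact pvSizeLB a b c n ha hb k total h
      · exact ih _ _ _ h1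
    · simp [pvCellsB, h] at hs

lemma pvRowA_cells (conv : Int × Int) (c : Nat) (n : Int) (ha : 1 ≤ conv.1) (hb : 1 ≤ conv.2) :
    ∀ (d r j : Nat) (total : Int), j + d = c → total ≤ n →
    ∃ front : List Int,
      (pvRowA c n conv r j total).1 = front ++ List.replicate (d - front.length) 0
      ∧ front.length ≤ d
      ∧ total + front.length ≤ (pvRowA c n conv r j total).2
      ∧ (pvRowA c n conv r j total).2 ≤ n
      ∧ ((pvRowA c n conv r j total).2 < n → front.length = d)
      ∧ ∀ fuel : Nat, n - total ≤ (fuel : Int) →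
          pvCellsB conv.1 conv.2 c n fuel (r * c + j) total
            = front ++ pvCellsB conv.1 conv.2 c n (fuel - front.length) (r * c + j + front.length)
                (pvRowA c n conv r j total).2 := by
  intro d
  induction d with
  | zero =>
    intro r j total hj htot
    have hjc : ¬ j < c := by omega
    rw [pvRowA]; simp only [hjc, dite_false]
    exact ⟨[], by simp, by simp, by simp, htot, by simp, fun fuel _ => by simp⟩
  | succ d ih =>
    intro r j total hj htot
    have hjc : j < c := by omega
    rw [pvRowA]; simp only [hjc, dite_true]
    by_cases hstop : n ≤ total
    · simp only [if_pos hstop]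
      refine ⟨[], by simp [show c - j = d + 1 by omega], by simp, by simp, htot,
        fun hlt => absurd hlt (by omega), fun fuel _ => by simp⟩
    · simp only [if_neg hstop]
      have htot' : total < n := by omega
      set s0 := pvCellSize r j conv with hs0def
      have hs0 : 1 ≤ s0 := by rw [hs0def]; unfold pvCellSize; split <;> omega
      set szA := if n < total + s0 then n - total else s0 with hszdef
      have hszmin : szA = min s0 (n - total) := by rw [hszdef]; split_ifs <;> omega
      have hsz1 : 1 ≤ szA := by rw [hszmin]; simp only [le_min_iff]; omega
      have hszle : szA ≤ n - total := by rw [hszmin]; omega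
      obtain ⟨front', hf1, hf2, hf3, hf4, hf5, hf6⟩ :=
        ih r (j + 1) (total + szA) (by omega) (by omega)
      refine ⟨szA :: front', ?_, by simpa using hf2, ?_, hf4, ?_, ?_⟩
      · simp only [List.cons_append, List.length_cons]
        rw [show d + 1 - (front'.length + 1) = d - front'.length by omega]
        exact congrArg (szA :: ·) hf1
      · simp only [List.length_cons] at *
        push_cast at hf3 ⊢; omega
      · intro hlt; simp only [List.length_cons, hf5 hlt]
      · intro fuel hfuel
        have hfne : fuel ≠ 0 := by intro hc0; subst hc0; simp at hfuel; omega
        obtain ⟨g, rfl⟩ := Nat.exists_eq_succ_of_ne_zero hfne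
        have hdiv : (r * c + j) / c = r := by
          rw [Nat.add_comm, Nat.add_mul_div_right _ _ (by omega : 0 < c),
            Nat.div_eq_of_lt hjc]; omega
        have hmod : (r * c + j) % c = j := by
          rw [Nat.add_comm, Nat.add_mul_mod_self_right, Nat.mod_eq_of_lt hjc]
        have hszB : min (if ((r * c + j) / c + (r * c + j) % c) % 2 = 0 then conv.1 else conv.2)
            (n - total) = szA := by
          rw [hdiv, hmod, hszmin, hs0def]; unfold pvCellSize; rfl
        simp only [pvCellsB, if_pos htot', hszB]
        have h6 := hf6 g (by push_cast at hfuel ⊢; omega)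
        rw [show r * c + (j + 1) = r * c + j + 1 by omega] at h6
        rw [h6]
        simp only [List.cons_append, List.length_cons]
        rw [show g + 1 - (front'.length + 1) = g - front'.length by omega,
          show r * c + j + (front'.length + 1) = r * c + j + 1 + front'.length by omega]
lemma pvGridA_stop (conv : Int × Int) (c : Nat) (n : Int) (fuel r : Nat) (total : Int)
    (h : n ≤ total) : pvGridA c n conv fuel r total = [] := by
  cases fuel <;> simp [pvGridA, (show ¬ total < n by omega)]

lemma pvGridA_cells (conv : Int × Int) (c : Nat) (n : Int) (ha : 1 ≤ conv.1) (hb : 1 ≤ conv.2)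
    (hc : 0 < c) :
    ∀ (fuelA r : Nat) (total : Int), total ≤ n → n - total ≤ (fuelA : Int) →
    ∃ p : Nat, (∀ row ∈ pvGridA c n conv fuelA r total, row.length = c)
      ∧ ∀ fuelB : Nat, n - total ≤ (fuelB : Int) →
        (pvGridA c n conv fuelA r total).flatten
          = pvCellsB conv.1 conv.2 c n fuelB (r * c) total ++ List.replicate p 0 := by
  intro fuelA
  induction fuelA with
  | zero =>
    intro r total h1 h2
    have h2' : n - total ≤ 0 := by exact_mod_cast h2
    refine ⟨0, by simp [pvGridA], fun fuelB _ => ?_⟩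
    rw [pvCellsB_stop _ _ _ _ _ _ _ (by omega)]; simp [pvGridA]
  | succ m ih =>
    intro r total h1 h2
    by_cases h : total < n
    · obtain ⟨front, hf1, hf2, hf3, hf4, hf5, hf6⟩ :=
        pvRowA_cells conv c n ha hb c r 0 total (by omega) h1
      simp only [pvGridA, if_pos h]
      have hrowlen : (pvRowA c n conv r 0 total).1.length = c := by
        rw [hf1]; simp; omega
      rcases lt_or_ge (pvRowA c n conv r 0 total).2 n with hlt | hge
      · have hlc : front.length = c := hf5 hlt
        have hstep : total + (c : Int) ≤ (pvRowA c n conv r 0 total).2 := by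
          have := hf3; rw [hlc] at this; exact this
        obtain ⟨p', hrows', hflat'⟩ := ih (r + 1) (pvRowA c n conv r 0 total).2 hf4
          (by push_cast at h2 ⊢; omega)
        refine ⟨p', ?_, fun fuelB hfB => ?_⟩
        · intro row hrow
          rcases List.mem_cons.1 hrow with rfl | hm
          · exact hrowlen
          · exact hrows' _ hm
        · have hcle : (c : Int) ≤ (fuelB : Int) := by push_cast at hfB ⊢; omega
          have hcleN : c ≤ fuelB := by exact_mod_cast hcle
          have h6 := hf6 fuelB hfB
          rw [Nat.add_zero, hlc] at h6
          rw [List.flatten_cons, h6,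
            hflat' (fuelB - c) (by push_cast [Nat.cast_sub hcleN] at hfB ⊢; omega)]
          rw [hf1, hlc]
          simp only [Nat.sub_self, List.replicate_zero, List.append_nil, List.append_assoc]
          rw [show r * c + c = (r + 1) * c by ring]
      · refine ⟨c - front.length, ?_, fun fuelB hfB => ?_⟩
        · intro row hrow
          rcases List.mem_cons.1 hrow with rfl | hm
          · exact hrowlen
          · rw [pvGridA_stop _ _ _ _ _ _ (by omega)] at hm; simp at hm
        · have h6 := hf6 fuelB hfB
          rw [Nat.add_zero] at h6
          rw [List.flatten_cons, pvGridA_stop _ _ _ _ _ _ (by omega : n ≤ (pvRowA c n conv r 0 total).2)]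
          rw [h6, pvCellsB_stop _ _ _ _ _ _ _ (by omega : n ≤ (pvRowA c n conv r 0 total).2)]
          simp [hf1]
    · have htn : n ≤ total := by omega
      refine ⟨0, ?_, fun fuelB _ => ?_⟩
      · rw [pvGridA_stop _ _ _ _ _ _ htn]; simp
      · rw [pvGridA_stop _ _ _ _ _ _ htn, pvCellsB_stop _ _ _ _ _ _ _ htn]; simp
def colContrib (c cc : Nat) : Nat → List Int → Int
  | _, [] => 0
  | k, s :: t => (if k % c = cc then s else 0) + colContrib c cc (k + 1) t

lemma colContrib_append (c cc : Nat) :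
    ∀ (l1 l2 : List Int) (k : Nat),
      colContrib c cc k (l1 ++ l2) = colContrib c cc k l1 + colContrib c cc (k + l1.length) l2 := by
  intro l1
  induction l1 with
  | nil => intro l2 k; simp [colContrib]
  | cons s t ih =>
    intro l2 k
    simp only [List.cons_append, colContrib, ih, List.length_cons]
    rw [show k + (t.length + 1) = k + 1 + t.length by omega]; ring

lemma colContrib_replicate (c cc : Nat) :
    ∀ (p k : Nat), colContrib c cc k (List.replicate p 0) = 0 := by
  intro p
  induction p with
  | zero => intro k; simp [colContrib]
  | succ q ih => intro k; simp [List.replicate_succ, colContrib, ih]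

lemma colContrib_nonneg (c cc : Nat) :
    ∀ (l : List Int) (k : Nat), (∀ s ∈ l, 0 ≤ s) → 0 ≤ colContrib c cc k l := by
  intro l
  induction l with
  | nil => intro k _; simp [colContrib]
  | cons s t ih =>
    intro k hpos
    have h1 := hpos s (List.mem_cons_self ..)
    have h2 := ih (k + 1) (fun x hx => hpos x (List.mem_cons_of_mem _ hx))
    simp only [colContrib]; split <;> omega

lemma colContrib_row (c cc : Nat) (hc : cc < c) :
    ∀ (row : List Int) (r j : Nat), j + row.length = c →
      colContrib c cc (r * c + j) row = if j ≤ cc then row.getD (cc - j) 0 else 0 := by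
  intro row
  induction row with
  | nil =>
    intro r j hj
    simp only [colContrib]
    split <;> simp
  | cons s t ih =>
    intro r j hj
    have hjc : j < c := by simp at hj; omega
    have hmod : (r * c + j) % c = j := by
      rw [Nat.add_comm, Nat.add_mul_mod_self_right, Nat.mod_eq_of_lt hjc]
    simp only [colContrib, hmod]
    rw [show r * c + j + 1 = r * c + (j + 1) by omega,
      ih r (j + 1) (by simp at hj ⊢; omega)]
    by_cases h1 : j = cc
    · rw [if_pos h1, if_neg (show ¬ j + 1 ≤ cc by omega), if_pos (by omega)]
      simp [show cc - j = 0 by omega]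
    · rw [if_neg h1]
      by_cases h2 : j ≤ cc
      · have h3 : j + 1 ≤ cc := by omega
        rw [if_pos h3, if_pos (by omega)]
        simp [show cc - j = (cc - (j+1)) + 1 by omega]
      · rw [if_neg (by omega), if_neg (by omega)]; simp

lemma pv_map_range_getD {α β : Type} (xs : List α) (f : α → β) (d : α) :
    (List.range xs.length).map (fun i => f (xs.getD i d)) = xs.map f := by
  apply List.ext_getElem
  · simp
  · intro i h1 h2
    simp only [List.getElem_map, List.getElem_range]
    rw [List.getD_eq_getElem xs d (by simpa using h2)]

lemma pv_sum_rows (c cc : Nat) (hc : cc < c) :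
    ∀ (rows : List (List Int)) (r0 : Nat), (∀ row ∈ rows, row.length = c) →
      (rows.map (fun row => row.getD cc 0)).sum = colContrib c cc (r0 * c) rows.flatten := by
  intro rows
  induction rows with
  | nil => intro r0 _; simp [colContrib]
  | cons row rest ih =>
    intro r0 hlen
    have hr : row.length = c := hlen row (List.mem_cons_self ..)
    simp only [List.map_cons, List.sum_cons, List.flatten_cons]
    rw [colContrib_append, hr,
      show r0 * c + c = (r0 + 1) * c by ring,
      ← ih (r0 + 1) (fun x hx => hlen x (List.mem_cons_of_mem _ hx))]
    have hrow := colContrib_row c cc hc row r0 0 (by omega)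
    rw [Nat.add_zero] at hrow
    rw [hrow]; simp
lemma pv_foldl_set_untouched {α : Type} (v : (List α × Int) → Nat → α)
    (u : (List α × Int) → Nat → Int) (d : α) :
    ∀ (order : List Nat) (st : List α × Int) (i : Nat), i ∉ order →
      ((order.foldl (fun st j => (st.1.set j (v st j), u st j)) st).1).getD i d
        = st.1.getD i d := by
  intro order
  induction order with
  | nil => intro st i _; rfl
  | cons j t ih =>
    intro st i hi
    simp only [List.mem_cons, not_or] at hi
    rw [List.foldl_cons, ih _ _ hi.2]
    exact pv_getD_set_ne _ _ _ _ _ hi.1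

lemma pvOffsets (ct : List Char) (L : List Int) (c : Nat)
    (hL : ∀ i, 0 ≤ L.getD i 0) :
    ∀ (order : List Nat) (colsA : List (List Char)) (offB : List Int) (s : Int),
      (∀ i ∈ order, i < c) → order.Nodup → colsA.length = c → offB.length = c → 0 ≤ s →
      ∀ i ∈ order,
        ((order.foldl (fun st idx =>
            (st.1.set idx (PySem.List.slice ct (some st.2) (some (st.2 + L.getD idx 0))),
             st.2 + L.getD idx 0)) (colsA, s)).1).getD i []
          = PySem.List.slice ct
              (some (((order.foldl (fun st i => (st.1.set i st.2, st.2 + L.getD i 0)) (offB, s)).1).getD i 0))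
              (some (((order.foldl (fun st i => (st.1.set i st.2, st.2 + L.getD i 0)) (offB, s)).1).getD i 0 + L.getD i 0))
        ∧ 0 ≤ ((order.foldl (fun st i => (st.1.set i st.2, st.2 + L.getD i 0)) (offB, s)).1).getD i 0 := by
  intro order
  induction order with
  | nil => intro _ _ _ _ _ _ _ _ i hi; simp at hi
  | cons j t ih =>
    intro colsA offB s hmem hnd hlenA hlenB hs i hi
    have hjc : j < c := hmem j (List.mem_cons_self ..)
    have hnd' : j ∉ t := (List.nodup_cons.1 hnd).1
    simp only [List.foldl_cons]
    rcases List.mem_cons.1 hi with rfl | hit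
    · rw [pv_foldl_set_untouched _ _ _ _ _ _ hnd', pv_foldl_set_untouched _ _ _ _ _ _ hnd']
      simp only
      rw [pv_getD_set_self _ _ _ _ (by omega), pv_getD_set_self _ _ _ _ (by omega)]
      exact ⟨rfl, hs⟩
    · exact ih _ _ _ (fun x hx => hmem x (List.mem_cons_of_mem _ hx)) (List.nodup_cons.1 hnd).2
        (by simpa using hlenA) (by simpa using hlenB)
        (by have := hL j; omega) i hit
def pvEmit (c : Nat) (f : Nat → Int → Int → List Char) :
    List Int → Nat → List Int × List (List Char) → List Int × List (List Char)
  | [], _, st => st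
  | s :: t, k, st =>
    if s ≠ 0 then
      pvEmit c f t (k + 1)
        (st.1.set (k % c) (st.1.getD (k % c) 0 + s), st.2 ++ [f (k % c) (st.1.getD (k % c) 0) s])
    else pvEmit c f t (k + 1) st

lemma pvEmit_append (c : Nat) (f : Nat → Int → Int → List Char) :
    ∀ (l1 l2 : List Int) (k : Nat) (st : List Int × List (List Char)),
      pvEmit c f (l1 ++ l2) k st = pvEmit c f l2 (k + l1.length) (pvEmit c f l1 k st) := by
  intro l1
  induction l1 with
  | nil => intro l2 k st; simp [pvEmit]
  | cons s t ih =>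
    intro l2 k st
    simp only [List.cons_append, pvEmit, List.length_cons]
    rw [show k + (t.length + 1) = k + 1 + t.length by omega]
    split <;> rw [ih]

lemma pvEmit_zeros (c : Nat) (f : Nat → Int → Int → List Char) :
    ∀ (p k : Nat) (st : List Int × List (List Char)),
      pvEmit c f (List.replicate p 0) k st = st := by
  intro p
  induction p with
  | zero => intro k st; simp [pvEmit]
  | succ q ih => intro k st; simp [List.replicate_succ, pvEmit, ih]

-- A's inner fold over range c, reading row.getD, equals pvEmit on the row
lemma pvEmitA_inner (c : Nat) (f : Nat → Int → Int → List Char) (r : Nat) :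
    ∀ (suf pre : List Int) (st : List Int × List (List Char)), pre.length + suf.length = c →
      (List.range' pre.length suf.length).foldl
        (fun st cc =>
          if (pre ++ suf).getD cc 0 ≠ 0 then
            (st.1.set cc (st.1.getD cc 0 + (pre ++ suf).getD cc 0),
             st.2 ++ [f cc (st.1.getD cc 0) ((pre ++ suf).getD cc 0)])
          else st) st
        = pvEmit c f suf (r * c + pre.length) st := by
  intro suf
  induction suf with
  | nil => intro pre st _; simp [pvEmit]
  | cons s t ih =>
    intro pre st hlen
    have hjc : pre.length < c := by simp at hlen; omega
    have hget : (pre ++ s :: t).getD pre.length 0 = s := by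
      rw [List.getD_eq_getElem?_getD, List.getElem?_append_right (le_refl _)]
      simp
    have hmod : (r * c + pre.length) % c = pre.length := by
      rw [Nat.add_comm, Nat.add_mul_mod_self_right, Nat.mod_eq_of_lt hjc]
    simp only [List.length_cons]
    rw [List.range'_succ, List.foldl_cons]
    have hre : ∀ st', (List.range' (pre.length + 1) t.length).foldl
        (fun st cc =>
          if (pre ++ s :: t).getD cc 0 ≠ 0 then
            (st.1.set cc (st.1.getD cc 0 + (pre ++ s :: t).getD cc 0),
             st.2 ++ [f cc (st.1.getD cc 0) ((pre ++ s :: t).getD cc 0)])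
          else st) st'
        = pvEmit c f t (r * c + (pre.length + 1)) st' := by
      intro st'
      have := ih (pre ++ [s]) st' (by simp at hlen ⊢; omega)
      simpa using this
    simp only [pvEmit, hmod, hget]
    split
    · rw [hre, show r * c + pre.length + 1 = r * c + (pre.length + 1) by omega]
    · rw [hre, show r * c + pre.length + 1 = r * c + (pre.length + 1) by omega]

-- A's outer fold over the rows equals pvEmit on the flattened grid
lemma pvEmitA_outer (c : Nat) (f : Nat → Int → Int → List Char) :
    ∀ (rows : List (List Int)) (r0 : Nat) (st : List Int × List (List Char)),
      (∀ row ∈ rows, row.length = c) →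
      rows.foldl (fun st row =>
        (List.range c).foldl
          (fun st cc =>
            if row.getD cc 0 ≠ 0 then
              (st.1.set cc (st.1.getD cc 0 + row.getD cc 0),
               st.2 ++ [f cc (st.1.getD cc 0) (row.getD cc 0)])
            else st) st) st
        = pvEmit c f rows.flatten (r0 * c) st := by
  intro rows
  induction rows with
  | nil => intro r0 st _; simp [pvEmit]
  | cons row rest ih =>
    intro r0 st hlen
    have hr : row.length = c := hlen row (List.mem_cons_self ..)
    simp only [List.foldl_cons, List.flatten_cons]
    rw [pvEmit_append, hr]
    have hinner := pvEmitA_inner c f r0 row [] st (by simpa using hr)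
    simp only [List.length_nil, List.nil_append, Nat.add_zero] at hinner
    rw [hr] at hinner
    rw [← List.range_eq_range'] at hinner
    rw [hinner, ih (r0 + 1) _ (fun x hx => hlen x (List.mem_cons_of_mem _ hx)),
      show r0 * c + c = (r0 + 1) * c by ring]

lemma pv_take_drop {α : Type} (l : List α) (o L p s : Nat) (h : p + s ≤ L) :
    (((l.drop o).take L).drop p).take s = (l.drop (o + p)).take s := by
  rw [List.drop_take, List.take_take, List.drop_drop]
  congr 1 <;> omega

lemma pv_slice_slice (l : List Char) (o q s L : Int) (ho : 0 ≤ o) (hq : 0 ≤ q) (hs : 0 ≤ s)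
    (hL : q + s ≤ L) :
    PySem.List.slice (PySem.List.slice l (some o) (some (o + L))) (some q) (some (q + s))
      = PySem.List.slice l (some (o + q)) (some (o + q + s)) := by
  rw [PySem.List.slice_toNat _ ho (by omega : (0:Int) ≤ o + L),
    PySem.List.slice_toNat _ hq (by omega : (0:Int) ≤ q + s),
    PySem.List.slice_toNat _ (by omega : (0:Int) ≤ o + q) (by omega : (0:Int) ≤ o + q + s)]
  rw [show (o + L).toNat - o.toNat = L.toNat by omega,
    show (q + s).toNat - q.toNat = s.toNat by omega,
    show (o + q + s).toNat - (o + q).toNat = s.toNat by omega,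
    show (o + q).toNat = o.toNat + q.toNat by omega]
  exact pv_take_drop l o.toNat L.toNat q.toNat s.toNat (by omega)

lemma pvEmit_congr (c : Nat) (hc : 0 < c) (L : List Int) (f g : Nat → Int → Int → List Char)
    (hfg : ∀ cc q s, cc < c → 0 ≤ q → 1 ≤ s → q + s ≤ L.getD cc 0 → f cc q s = g cc q s) :
    ∀ (l : List Int) (k : Nat) (st : List Int × List (List Char)),
      (∀ s ∈ l, 1 ≤ s) → st.1.length = c →
      (∀ cc, cc < c → 0 ≤ st.1.getD cc 0 ∧ st.1.getD cc 0 + colContrib c cc k l ≤ L.getD cc 0) →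
      pvEmit c f l k st = pvEmit c g l k st := by
  intro l
  induction l with
  | nil => intro k st _ _ _; rfl
  | cons s t ih =>
    intro k st hpos hlen hinv
    have hs1 : 1 ≤ s := hpos s (List.mem_cons_self ..)
    have hposT : ∀ x ∈ t, 1 ≤ x := fun x hx => hpos x (List.mem_cons_of_mem _ hx)
    have hmlt : k % c < c := Nat.mod_lt _ hc
    obtain ⟨hq0, hqsum⟩ := hinv (k % c) hmlt
    have hcontrT : 0 ≤ colContrib c (k % c) (k + 1) t :=
      colContrib_nonneg _ _ _ _ (fun x hx => by have := hposT x hx; omega)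
    have hcontr : colContrib c (k % c) k (s :: t) = s + colContrib c (k % c) (k + 1) t := by
      simp [colContrib]
    have hqs : st.1.getD (k % c) 0 + s ≤ L.getD (k % c) 0 := by omega
    simp only [pvEmit, if_pos (by omega : s ≠ 0)]
    rw [hfg (k % c) (st.1.getD (k % c) 0) s hmlt hq0 hs1 hqs]
    apply ih _ _ hposT (by simpa using hlen)
    intro cc hcc
    by_cases h : cc = k % c
    · subst h
      rw [pv_getD_set_self _ _ _ _ (by omega)]
      exact ⟨by omega, by omega⟩
    · rw [pv_getD_set_ne _ _ _ _ _ h]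
      obtain ⟨h1, h2⟩ := hinv cc hcc
      have : colContrib c cc k (s :: t) = colContrib c cc (k + 1) t := by
        simp [colContrib, if_neg (fun hx : k % c = cc => h hx.symm)]
      omega

-- ===== B-side machinery: row-major tags, per-column tags, bucket/consume/sort lemmas =====

-- row-major walk of the flat cells: one (plainOffset, column, columnOffset, size) per cell
def rowTags (c : Nat) : List Int → Nat → Int → List Int → List (Int × Nat × Int × Int)
  | [], _, _, _ => []
  | s :: t, k, P, qs =>
    (P, k % c, qs.getD (k % c) 0, s)
      :: rowTags c t (k + 1) (P + s) (qs.set (k % c) (qs.getD (k % c) 0 + s))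

-- the cells of one column cc in row order: (plainOffset, columnOffset, size)
def colTags (c cc : Nat) : List Int → Nat → Int → Int → List (Int × Int × Int)
  | [], _, _, _ => []
  | s :: t, k, P, q =>
    if k % c = cc then (P, q, s) :: colTags c cc t (k + 1) (P + s) (q + s)
    else colTags c cc t (k + 1) (P + s) q

-- bucketing pass: B's enumerate-fold fills bycol[cc] with colTags' (P, size) pairs
lemma pvBucketB (c : Nat) (hc : 0 < c) :
    ∀ (cells : List Int) (k0 : Nat) (acc : List (List (Int × Int))) (p : Int), acc.length = c →
      (((PySem.List.enumerate cells (k0 : Int)).foldl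
        (fun (st : List (List (Int × Int)) × Int) pr =>
          (PySem.List.pySetD st.1 (PySem.Int.mod pr.1 (c : Int))
             (PySem.List.pyGetD st.1 (PySem.Int.mod pr.1 (c : Int)) [] ++ [(st.2, pr.2)]),
           st.2 + pr.2)) (acc, p)).1).length = c
      ∧ ∀ cc q, cc < c →
        (((PySem.List.enumerate cells (k0 : Int)).foldl
          (fun (st : List (List (Int × Int)) × Int) pr =>
            (PySem.List.pySetD st.1 (PySem.Int.mod pr.1 (c : Int))
               (PySem.List.pyGetD st.1 (PySem.Int.mod pr.1 (c : Int)) [] ++ [(st.2, pr.2)]),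
             st.2 + pr.2)) (acc, p)).1).getD cc []
          = acc.getD cc [] ++ (colTags c cc cells k0 p q).map (fun t => (t.1, t.2.2)) := by
  intro cells
  induction cells with
  | nil =>
    intro k0 acc p hlen
    simp [PySem.List.enumerate_nil, colTags, hlen]
  | cons s t ih =>
    intro k0 acc p hlen
    rw [PySem.List.enumerate_cons]
    have hcast : (k0 : Int) + 1 = ((k0 + 1 : Nat) : Int) := by push_cast; ring
    simp only [List.foldl_cons, PySem.Int.mod_natCast, PySem.List.pySetD_natCast,
      PySem.List.pyGetD_natCast, hcast]
    have hmlt : k0 % c < c := Nat.mod_lt _ hc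
    have hlen' : (acc.set (k0 % c) (acc.getD (k0 % c) [] ++ [(p, s)])).length = c := by
      simpa using hlen
    obtain ⟨ihl, ihv⟩ := ih (k0 + 1) _ (p + s) hlen'
    refine ⟨ihl, fun cc q hcc => ?_⟩
    by_cases h : cc = k0 % c
    · subst h
      rw [ihv _ (q + s) hcc, pv_getD_set_self _ _ _ _ (by omega)]
      simp [colTags]
    · rw [ihv cc q hcc, pv_getD_set_ne _ _ _ _ _ h]
      simp only [colTags, if_neg (fun hx : k0 % c = cc => h hx.symm)]

-- one column's consumption: the inner fold over bycol[cc] slices ct sequentially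
lemma pvColConsume (c cc : Nat) (ct : List Char) :
    ∀ (l : List Int) (k : Nat) (P q : Int) (out : List (Int × List Char)) (base : Int),
      ((colTags c cc l k P q).map (fun t => (t.1, t.2.2))).foldl
        (fun (st : List (Int × List Char) × Int) qs =>
          (st.1 ++ [(qs.1, PySem.List.slice ct (some st.2) (some (st.2 + qs.2)))],
           st.2 + qs.2)) (out, base + q)
      = (out ++ (colTags c cc l k P q).map (fun t =>
            (t.1, PySem.List.slice ct (some (base + t.2.1)) (some (base + t.2.1 + t.2.2)))),
         base + q + colContrib c cc k l) := by
  intro l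
  induction l with
  | nil => intro k P q out base; simp [colTags, colContrib]
  | cons s t ih =>
    intro k P q out base
    by_cases h : k % c = cc
    · simp only [colTags, colContrib, if_pos h, List.map_cons, List.foldl_cons]
      rw [show base + q + s = base + (q + s) by ring]
      rw [ih (k + 1) (P + s) (q + s) _ base]
      simp only [Prod.mk.injEq, List.append_assoc, List.cons_append, List.nil_append, true_and]
      ring
    · simp only [colTags, colContrib, if_neg h]
      rw [ih (k + 1) (P + s) q out base]
      simp only [Prod.mk.injEq, true_and]
      ring

-- B's outer fold over the key order: pieces are the per-column consumptions, each
-- column starting at its absolute offset (the same offset fold pvOffsets talks about)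
lemma pvOuterB (c : Nat) (ct : List Char) (cells : List Int) (CL : List Int) :
    ∀ (ordl : List Nat) (bycol : List (List (Int × Int))) (out : List (Int × List Char))
      (s0 : Int) (offacc : List Int),
      ordl.Nodup → (∀ i ∈ ordl, i < c) → offacc.length = c →
      (∀ cc ∈ ordl, bycol.getD cc []
          = (colTags c cc cells 0 0 0).map (fun t => (t.1, t.2.2))) →
      (∀ i ∈ ordl, CL.getD i 0 = colContrib c i 0 cells) →
      (ordl.foldl (fun (st : List (Int × List Char) × Int) cc =>
          (bycol.getD cc []).foldl
            (fun (st : List (Int × List Char) × Int) qs =>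
              (st.1 ++ [(qs.1, PySem.List.slice ct (some st.2) (some (st.2 + qs.2)))],
               st.2 + qs.2)) st) (out, s0)).1
        = out ++ ordl.flatMap (fun cc => (colTags c cc cells 0 0 0).map (fun t =>
            (t.1, PySem.List.slice ct
              (some (((ordl.foldl (fun (st : List Int × Int) i => (st.1.set i st.2, st.2 + CL.getD i 0)) (offacc, s0)).1).getD cc 0 + t.2.1))
              (some (((ordl.foldl (fun (st : List Int × Int) i => (st.1.set i st.2, st.2 + CL.getD i 0)) (offacc, s0)).1).getD cc 0 + t.2.1 + t.2.2))))) := by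
  intro ordl
  induction ordl with
  | nil => intro bycol out s0 offacc _ _ _ _ _; simp
  | cons j t ih =>
    intro bycol out s0 offacc hnd hmem hlenB hbycol hCL
    have hjc : j < c := hmem j (List.mem_cons_self ..)
    have hjt : j ∉ t := (List.nodup_cons.1 hnd).1
    simp only [List.foldl_cons, List.flatMap_cons]
    -- the head column consumes from s0
    rw [hbycol j (List.mem_cons_self ..)]
    have hcons := pvColConsume c j ct cells 0 0 0 out s0
    rw [add_zero] at hcons
    rw [hcons]
    -- offset of the head column in the full offset fold is s0
    have hoffj : ((t.foldl (fun (st : List Int × Int) i => (st.1.set i st.2, st.2 + CL.getD i 0)) (offacc.set j s0, s0 + CL.getD j 0)).1).getD j 0 = s0 := by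
      rw [pv_foldl_set_untouched _ _ _ _ _ _ hjt]
      exact pv_getD_set_self _ _ _ _ (by omega)
    rw [hoffj]
    rw [show colContrib c j 0 cells = CL.getD j 0 from (hCL j (List.mem_cons_self ..)).symm]
    -- tail: apply the IH with the updated accumulators
    rw [ih bycol _ (s0 + CL.getD j 0) (offacc.set j s0) (List.nodup_cons.1 hnd).2 (fun x hx => hmem x (List.mem_cons_of_mem _ hx))
      (by simpa using hlenB) (fun cc hcc => hbycol cc (List.mem_cons_of_mem _ hcc))
      (fun i hi => hCL i (List.mem_cons_of_mem _ hi))]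
    simp only [List.append_assoc]

-- generic helpers for the permutation argument
lemma pv_getD_replicate_any {α : Type} (c i : Nat) (d : α) :
    (List.replicate c d).getD i d = d := by
  rcases lt_or_ge i c with h|h
  · simp [List.getD_eq_getElem?_getD, h]
  · simp [List.getD_eq_getElem?_getD,
      List.getElem?_eq_none_iff.2 (by simpa using h : (List.replicate c d).length ≤ i)]

lemma pv_flatMap_congr {α β : Type} (l : List α) (f g : α → List β)
    (h : ∀ a ∈ l, f a = g a) : l.flatMap f = l.flatMap g := by
  induction l with
  | nil => rfl
  | cons a t ih =>
    simp only [List.flatMap_cons, h a (List.mem_cons_self ..),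
      ih (fun x hx => h x (List.mem_cons_of_mem _ hx))]

-- the row-major tag list is a permutation of the per-column tag lists, glued per column
lemma pvRowColPerm (c : Nat) (hc : 0 < c) :
    ∀ (l : List Int) (k : Nat) (P : Int) (qs : List Int), qs.length = c →
      (rowTags c l k P qs).Perm
        ((List.range c).flatMap (fun cc =>
          (colTags c cc l k P (qs.getD cc 0)).map (fun t => (t.1, cc, t.2.1, t.2.2)))) := by
  intro l
  induction l with
  | nil =>
    intro k P qs _
    simp [rowTags, colTags]
  | cons s t ih =>
    intro k P qs hlen
    have hmlt : k % c < c := Nat.mod_lt _ hc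
    set cc0 := k % c with hcc0
    set q0 := qs.getD cc0 0 with hq0
    set qs' := qs.set cc0 (q0 + s) with hqs'
    have hlen' : qs'.length = c := by simp [hqs', hlen]
    set G := fun cc => (colTags c cc t (k + 1) (P + s) (qs'.getD cc 0)).map
      (fun t => (t.1, cc, t.2.1, t.2.2)) with hG
    set F := fun cc => (colTags c cc (s :: t) k P (qs.getD cc 0)).map
      (fun t => (t.1, cc, t.2.1, t.2.2)) with hF
    have hFG : ∀ cc, cc ≠ cc0 → F cc = G cc := by
      intro cc hne
      rw [hF, hG]
      simp only [colTags, if_neg (fun hx : k % c = cc => hne (by rw [← hx]))]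
      rw [pv_getD_set_ne _ _ _ _ _ hne]
    have hFcc0 : F cc0 = (P, cc0, q0, s) :: G cc0 := by
      rw [hF, hG]
      simp only [colTags]
      rw [if_pos hcc0.symm, pv_getD_set_self _ _ _ _ (by omega), ← hq0]
      simp
    have hsplit : List.range c
        = List.range' 0 cc0 ++ cc0 :: List.range' (cc0 + 1) (c - cc0 - 1) := by
      have h1 : List.range' (0 + 1 * cc0) (c - cc0) = cc0 :: List.range' (cc0 + 1) (c - cc0 - 1) := by
        rw [show 0 + 1 * cc0 = cc0 by omega, show c - cc0 = (c - cc0 - 1) + 1 by omega,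
          List.range'_succ]
        simp
      rw [List.range_eq_range', show c = cc0 + (c - cc0) by omega, ← List.range'_append, h1,
        show cc0 + (c - cc0) - cc0 - 1 = c - cc0 - 1 from by omega]
    have hX : (List.range' 0 cc0).flatMap F = (List.range' 0 cc0).flatMap G :=
      pv_flatMap_congr _ _ _ (fun cc hcc => hFG cc (by have := List.mem_range'_1.1 hcc; omega))
    have hZ : (List.range' (cc0 + 1) (c - cc0 - 1)).flatMap F
        = (List.range' (cc0 + 1) (c - cc0 - 1)).flatMap G :=
      pv_flatMap_congr _ _ _ (fun cc hcc => hFG cc (by have := List.mem_range'_1.1 hcc; omega))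
    have hRHS : (List.range c).flatMap F
        = (List.range' 0 cc0).flatMap G
            ++ (P, cc0, q0, s) :: (G cc0 ++ (List.range' (cc0 + 1) (c - cc0 - 1)).flatMap G) := by
      rw [hsplit, List.flatMap_append, List.flatMap_cons, hX, hZ, hFcc0]
      simp [List.append_assoc]
    have hIHsplit : (List.range c).flatMap G
        = (List.range' 0 cc0).flatMap G
            ++ (G cc0 ++ (List.range' (cc0 + 1) (c - cc0 - 1)).flatMap G) := by
      rw [hsplit, List.flatMap_append, List.flatMap_cons]
    have hperm := ih (k + 1) (P + s) qs' hlen'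
    rw [hIHsplit] at hperm
    show ((P, cc0, q0, s) :: rowTags c t (k + 1) (P + s) qs').Perm ((List.range c).flatMap F)
    rw [hRHS]
    exact (List.Perm.cons _ hperm).trans List.perm_middle.symm

-- strictly increasing plaintext offsets along the row-major walk
lemma pvRowTags_incr (c : Nat) :
    ∀ (l : List Int) (k : Nat) (P : Int) (qs : List Int), (∀ s ∈ l, 1 ≤ s) →
      (∀ t ∈ rowTags c l k P qs, P ≤ t.1)
      ∧ (rowTags c l k P qs).Pairwise (fun x y => x.1 < y.1) := by
  intro l
  induction l with
  | nil => intro k P qs _; simp [rowTags]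
  | cons s t ih =>
    intro k P qs hpos
    have hs1 : 1 ≤ s := hpos s (List.mem_cons_self ..)
    obtain ⟨ihlb, ihpw⟩ := ih (k + 1) (P + s) (qs.set (k % c) (qs.getD (k % c) 0 + s))
      (fun x hx => hpos x (List.mem_cons_of_mem _ hx))
    constructor
    · intro x hx
      rcases List.mem_cons.1 hx with rfl | hm
      · exact le_refl _
      · have := ihlb x hm; omega
    · refine List.pairwise_cons.2 ⟨fun y hy => ?_, ihpw⟩
      have := ihlb y hy; simp only; omega

-- pvEmit's emitted chunks are the row-major tags, mapped through f
lemma pvEmit_rowTags (c : Nat) (f : Nat → Int → Int → List Char) :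
    ∀ (l : List Int) (k : Nat) (P : Int) (qs : List Int) (out : List (List Char)),
      (∀ s ∈ l, 1 ≤ s) →
      (pvEmit c f l k (qs, out)).2
        = out ++ (rowTags c l k P qs).map (fun t => f t.2.1 t.2.2.1 t.2.2.2) := by
  intro l
  induction l with
  | nil => intro k P qs out _; simp [pvEmit, rowTags]
  | cons s t ih =>
    intro k P qs out hpos
    have hs1 : 1 ≤ s := hpos s (List.mem_cons_self ..)
    simp only [pvEmit, if_pos (by omega : s ≠ 0), rowTags, List.map_cons]
    rw [ih (k + 1) (P + s) _ _ (fun x hx => hpos x (List.mem_cons_of_mem _ hx))]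
    simp

-- ===== MAIN THEOREM =====
theorem pvMain (ciphertext : String) (key : List Int) (convention : Int × Int)
    (ha : 1 ≤ convention.1) (hb : 1 ≤ convention.2) :
    amsco_decode ciphertext key convention = amsco_decode_alt ciphertext key convention := by
  simp only [amsco_decode, amsco_decode_alt]
  set ct := pvNormalize ciphertext.toList with hct
  by_cases hg : key.length = 0 ∨ ct.length = 0
  · rw [if_pos hg, if_pos hg]
  · rw [if_neg hg, if_neg hg]
    obtain ⟨hc0, hn0⟩ := not_or.mp hg
    set c := key.length with hcdef
    set N := ct.length with hNdef
    have hcpos : 0 < c := Nat.pos_of_ne_zero hc0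
    have hNpos : 0 < N := Nat.pos_of_ne_zero hn0
    set n : Int := (N : Int) with hndef
    -- grid ↔ cells
    set sizes := pvGridA c n convention N 0 0 with hsizes
    set cells := pvCellsB convention.1 convention.2 c n N 0 0 with hcells
    obtain ⟨p, hrows, hflatF⟩ :=
      pvGridA_cells convention c n ha hb hcpos N 0 0 (by omega) (by omega)
    have hflat : sizes.flatten = cells ++ List.replicate p 0 := by
      rw [hsizes, hcells]
      have := hflatF N (by omega)
      simpa using this
    have hcellpos : ∀ s ∈ cells, 1 ≤ s := fun s hs =>
      pvCellsB_pos convention.1 convention.2 c n ha hb N 0 0 s hs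
    -- the common column-length value
    set L : Nat → Int := fun cc => colContrib c cc 0 cells with hLdef
    have hLnn : ∀ cc, 0 ≤ L cc := fun cc =>
      colContrib_nonneg c cc cells 0 (fun s hs => by have := hcellpos s hs; omega)
    -- A's column lengths
    have hAcol : ∀ cc, cc < c →
        ((List.range sizes.length).map (fun rr => (sizes.getD rr []).getD cc 0)).sum = L cc := by
      intro cc hcc
      rw [pv_map_range_getD sizes (fun row => row.getD cc 0) []]
      have h1 := pv_sum_rows c cc hcc sizes 0 hrows
      rw [Nat.zero_mul] at h1
      rw [h1, hflat, colContrib_append, colContrib_replicate, hLdef]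
      simp
    set CL := (List.range c).map (fun cc =>
        ((List.range sizes.length).map (fun rr => (sizes.getD rr []).getD cc 0)).sum) with hCL
    have hCLgetD : ∀ cc, cc < c → CL.getD cc 0 = L cc := by
      intro cc hcc
      rw [List.getD_eq_getElem _ _ (by simp [hCL]; omega)]
      simp only [hCL, List.getElem_map, List.getElem_range]
      exact hAcol cc hcc
    have hCLnn : ∀ i, 0 ≤ CL.getD i 0 := by
      intro i
      by_cases hic : i < c
      · rw [hCLgetD i hic]; exact hLnn i
      · rw [List.getD_eq_default _ _ (by simp [hCL]; omega)]
    set ord := PySem.List.sorted (List.range c) (fun i => key.getD i 0) false with hord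
    have hmem : ∀ i ∈ ord, i < c := by
      intro i hi
      rw [hord, PySem.List.mem_sorted] at hi
      exact List.mem_range.1 hi
    have hnd : ord.Nodup := by
      rw [hord]
      exact ((PySem.List.sorted_perm (List.range c) (fun i => key.getD i 0) false).symm).nodup
        (List.nodup_range)
    have hoff := pvOffsets ct CL c hCLnn ord (List.replicate c []) (List.replicate c 0) 0
      hmem hnd (by simp) (by simp) le_rfl
    set COLS := (List.foldl (fun st idx =>
        (st.1.set idx (PySem.List.slice ct (some st.2) (some (st.2 + CL.getD idx 0))),
         st.2 + CL.getD idx 0)) (List.replicate c ([] : List Char), (0 : Int)) ord).1 with hCOLS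
    set OFF := (List.foldl (fun st i => (st.1.set i st.2, st.2 + CL.getD i 0))
        (List.replicate c (0 : Int), (0 : Int)) ord).1 with hOFF
    -- ===== A side: A's output is the row-major tag list mapped through g =====
    set g : Nat → Int → Int → List Char := fun cc q s =>
      PySem.List.slice ct (some (OFF.getD cc 0 + q)) (some (OFF.getD cc 0 + q + s)) with hgdef
    have hA := pvEmitA_outer c (fun cc q s => PySem.List.slice (COLS.getD cc [])
        (some q) (some (q + s))) sizes 0 (List.replicate c 0, []) hrows
    simp only [Nat.zero_mul] at hA
    rw [hA]
    rw [hflat, pvEmit_append, pvEmit_zeros]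
    have hfg : ∀ cc q s, cc < c → 0 ≤ q → 1 ≤ s → q + s ≤ CL.getD cc 0 →
        PySem.List.slice (COLS.getD cc []) (some q) (some (q + s)) = g cc q s := by
      intro cc q s hcc hq hs hqs
      have hccord : cc ∈ ord := by rw [hord, PySem.List.mem_sorted]; exact List.mem_range.2 hcc
      obtain ⟨hcols, hopos⟩ := hoff cc hccord
      rw [hgdef]
      simp only
      rw [hcols]
      exact pv_slice_slice ct (OFF.getD cc 0) q s (CL.getD cc 0) hopos hq (by omega) hqs
    have hinv : ∀ cc, cc < c → 0 ≤ (List.replicate c (0 : Int)).getD cc 0 ∧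
        (List.replicate c (0 : Int)).getD cc 0 + colContrib c cc 0 cells ≤ CL.getD cc 0 := by
      intro cc hcc
      rw [pv_getD_replicate, hCLgetD cc hcc, hLdef]
      exact ⟨le_rfl, by simp⟩
    rw [pvEmit_congr c hcpos CL (fun cc q s => PySem.List.slice (COLS.getD cc [])
      (some q) (some (q + s))) g hfg cells 0 (List.replicate c 0, []) hcellpos (by simp) hinv]
    rw [pvEmit_rowTags c g cells 0 0 (List.replicate c 0) [] hcellpos]
    -- ===== B side: bucket, consume in key order, sort by plaintext offset =====
    obtain ⟨hbkl, hbkv⟩ := pvBucketB c hcpos cells 0 (List.replicate c []) 0 (by simp)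
    have hbycol : ∀ cc ∈ ord, ((((PySem.List.enumerate cells ((0:Nat) : Int)).foldl
        (fun (st : List (List (Int × Int)) × Int) pr =>
          (PySem.List.pySetD st.1 (PySem.Int.mod pr.1 (c : Int))
             (PySem.List.pyGetD st.1 (PySem.Int.mod pr.1 (c : Int)) [] ++ [(st.2, pr.2)]),
           st.2 + pr.2)) (List.replicate c [], 0)).1).getD cc [])
          = (colTags c cc cells 0 0 0).map (fun t => (t.1, t.2.2)) := by
      intro cc hcc
      rw [hbkv cc 0 (hmem cc hcc), pv_getD_replicate_any]
      simp
    have hCLcol : ∀ i ∈ ord, CL.getD i 0 = colContrib c i 0 cells := by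
      intro i hi
      rw [hCLgetD i (hmem i hi), hLdef]
    have hOut := pvOuterB c ct cells CL ord _ [] 0 (List.replicate c 0) hnd hmem (by simp)
      hbycol hCLcol
    simp only [Nat.cast_zero] at hOut
    rw [hOut]
    simp only [List.nil_append]
    -- the sorted pieces are exactly the row-major tag list mapped through the slices
    set hh : (Int × Nat × Int × Int) → Int × List Char :=
      fun t => (t.1, g t.2.1 t.2.2.1 t.2.2.2) with hhdef
    set canon := (rowTags c cells 0 0 (List.replicate c 0)).map hh with hcanon
    have hpermRC := pvRowColPerm c hcpos cells 0 0 (List.replicate c 0) (by simp)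
    have hq0 : ∀ cc, (List.replicate c (0 : Int)).getD cc 0 = 0 := pv_getD_replicate c
    simp only [hq0] at hpermRC
    have hpermOrd : (List.range c).Perm ord :=
      (PySem.List.sorted_perm (List.range c) (fun i => key.getD i 0) false).symm
    have hpermFlat : ((List.range c).flatMap (fun cc =>
        (colTags c cc cells 0 0 0).map (fun t => (t.1, cc, t.2.1, t.2.2)))).Perm
        (ord.flatMap (fun cc =>
        (colTags c cc cells 0 0 0).map (fun t => (t.1, cc, t.2.1, t.2.2)))) :=
      hpermOrd.flatMap (fun a _ => List.Perm.refl _)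
    have hmapBack : ∀ (lst : List Nat),
        (lst.flatMap (fun cc =>
          (colTags c cc cells 0 0 0).map (fun t => (t.1, cc, t.2.1, t.2.2)))).map hh
        = lst.flatMap (fun cc => (colTags c cc cells 0 0 0).map (fun t =>
            (t.1, PySem.List.slice ct (some (OFF.getD cc 0 + t.2.1))
              (some (OFF.getD cc 0 + t.2.1 + t.2.2))))) := by
      intro lst
      rw [List.map_flatMap]
      apply pv_flatMap_congr
      intro cc _
      rw [List.map_map]
      rfl
    have hpermPieces : canon.Perm (ord.flatMap (fun cc =>
        (colTags c cc cells 0 0 0).map (fun t =>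
          (t.1, PySem.List.slice ct (some (OFF.getD cc 0 + t.2.1))
            (some (OFF.getD cc 0 + t.2.1 + t.2.2)))))) := by
      rw [hcanon, ← hmapBack ord]
      exact (hpermRC.trans hpermFlat).map hh
    have hpw : canon.Pairwise (fun x y => x.1 < y.1) := by
      rw [hcanon]
      have := (pvRowTags_incr c cells 0 0 (List.replicate c 0) hcellpos).2
      exact this.map hh (fun x y hxy => by simp only [hhdef]; exact hxy)
    have hsortEq : PySem.List.sorted (ord.flatMap (fun cc =>
        (colTags c cc cells 0 0 0).map (fun t =>
          (t.1, PySem.List.slice ct (some (OFF.getD cc 0 + t.2.1))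
            (some (OFF.getD cc 0 + t.2.1 + t.2.2)))))) (fun t => t.1) false = canon :=
      PySem.List.sorted_eq_of_perm_of_pairwise_lt _ _ (fun t => t.1) hpermPieces hpw
    rw [hsortEq, hcanon, List.map_map]
    rfl

-- ===== VERDICT (by name: the statement is the Claim_ definition above) =====
theorem amsco_decode_spec : Claim_equal_amsco_decode := by
  intro ciphertext key convention _ hpre
  unfold Spec_amsco_decode
  rcases hpre with ⟨ha, hb⟩ | hk | hna
  · exact pvMain ciphertext key convention ha hb
  · subst hk; simp [amsco_decode, amsco_decode_alt]
  · have hnorm : pvNormalize ciphertext.toList = [] := by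
      unfold pvNormalize; rw [hna]; rfl
    simp [amsco_decode, amsco_decode_alt, hnorm]
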